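-- pv_equiv track=rewrite | github.com/that-cyber-guy/llm_engineering | week1/week1 EXERCISE.py | get_url_user_prompt
-- ===== SOURCE A (Python) =====
-- def get_url_user_prompt(urls_list):
--     user_prompt = "Here is the list of URLs to analyze:\n" + "\n".join(urls_list)
--     truncated_urls = []
--     total_length = 0
--     for url in urls_list:
--         if total_length + len(url) + 1 > 5000:  # +1 accounts for the newline character
--             break
--         truncated_urls.append(url)
--         total_length += len(url) + 1
--     return "Here is the list of URLs to analyze:\n" + "\n".join(truncated_urls)
-- ===== SOURCE B (Python) =====
-- def get_url_user_prompt(urls_list):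
--     # Prefix-sum decomposition: compute the running cost table in one pass,
--     # count how many running totals fit in the 5000 budget, slice the list there.
--     prefixes = []
--     total = 0
--     for url in urls_list:
--         total += len(url) + 1
--         prefixes.append(total)
--     k = sum(1 for p in prefixes if p <= 5000)
--     return "Here is the list of URLs to analyze:\n" + "\n".join(urls_list[:k])
-- ===== Notes on version B (the rewrite author's own statement) =====
-- stated objective: simpler
-- what changed: Replaced the inline break-out accumulating loop (which builds the truncated list while summing) with a prefix-sum table built in one pass, a count of how many running totals stay within the 5000 budget, and a single slice urls_list[:k]; the unused user_prompt variable is dropped.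
import Mathlib
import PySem

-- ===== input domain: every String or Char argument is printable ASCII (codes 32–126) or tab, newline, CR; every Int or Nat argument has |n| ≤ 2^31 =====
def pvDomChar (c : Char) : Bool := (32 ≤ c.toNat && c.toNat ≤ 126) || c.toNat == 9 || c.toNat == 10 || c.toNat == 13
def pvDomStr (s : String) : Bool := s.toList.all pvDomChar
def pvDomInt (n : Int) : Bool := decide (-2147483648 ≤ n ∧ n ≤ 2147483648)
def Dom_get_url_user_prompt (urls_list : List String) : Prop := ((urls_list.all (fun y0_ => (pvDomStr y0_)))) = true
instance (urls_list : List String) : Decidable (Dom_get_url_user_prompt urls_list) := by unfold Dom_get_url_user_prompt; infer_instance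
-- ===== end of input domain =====

-- B replaces A's break-out accumulating loop by a prefix-sum table + count + slice (same cost, simpler decomposition).


-- Python's 'a + b' on strings, kernel-transparent (shared by both ports).
def pvStrAdd (a b : String) : String := String.ofList (a.toList ++ b.toList)

-- ===== PORT A =====
-- the for-loop with break: state = (truncated_urls, total_length)
def pvGoA : List String → List String → Int → List String
  | [], acc, _ => acc
  | u :: rest, acc, total =>
    if 5000 < total + PySem.Str.len u + 1 then acc
    else pvGoA rest (acc ++ [u]) (total + PySem.Str.len u + 1)

def get_url_user_prompt (urls_list : List String) : String :=
  let _user_prompt := pvStrAdd "Here is the list of URLs to analyze:\n" (PySem.Str.join "\n" urls_list)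
  pvStrAdd "Here is the list of URLs to analyze:\n" (PySem.Str.join "\n" (pvGoA urls_list [] 0))

-- ===== PORT B =====
def get_url_user_prompt_alt (urls_list : List String) : String :=
  let st := urls_list.foldl
    (fun (st : List Int × Int) url =>
      let t := st.2 + PySem.Str.len url + 1
      (st.1 ++ [t], t)) ([], 0)
  let k : Nat := st.1.countP (fun p => p ≤ 5000)
  pvStrAdd "Here is the list of URLs to analyze:\n"
    (PySem.Str.join "\n" (PySem.List.slice urls_list none (some (k : Int))))

-- ===== PRECONDITION & SPEC =====
def Spec_get_url_user_prompt (urls_list : List String) (out : String) : Prop := out = get_url_user_prompt_alt urls_list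
instance (urls_list : List String) (out : String) : Decidable (Spec_get_url_user_prompt urls_list out) := by unfold Spec_get_url_user_prompt; infer_instance

-- ===== CLAIM (what is proved, stated in full; the proofs are below) =====
def Claim_equal_get_url_user_prompt : Prop := ∀ (urls_list : List String), Dom_get_url_user_prompt urls_list → Spec_get_url_user_prompt urls_list (get_url_user_prompt urls_list)

-- ===== LEMMAS AND PROOFS =====

-- recursive form of B's prefix-sum table
def pvPrefs : List String → Int → List Int
  | [], _ => []
  | u :: rest, total =>
    (total + PySem.Str.len u + 1) :: pvPrefs rest (total + PySem.Str.len u + 1)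

theorem pvFoldl_eq_prefs (urls : List String) (acc : List Int) (t : Int) :
    (urls.foldl (fun (st : List Int × Int) url =>
        let x := st.2 + PySem.Str.len url + 1
        (st.1 ++ [x], x)) (acc, t)).1 = acc ++ pvPrefs urls t := by
  induction urls generalizing acc t with
  | nil => simp [pvPrefs]
  | cons u rest ih =>
    rw [List.foldl_cons]
    show (List.foldl _ (acc ++ [t + PySem.Str.len u + 1], t + PySem.Str.len u + 1) rest).1 = _
    rw [ih, pvPrefs, List.append_assoc, List.singleton_append]

theorem pvPrefs_ge (urls : List String) (t : Int) :
    ∀ p ∈ pvPrefs urls t, t + 1 ≤ p := by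
  induction urls generalizing t with
  | nil => simp [pvPrefs]
  | cons u rest ih =>
    intro p hp
    have hlen : 0 ≤ PySem.Str.len u := by
      simp [PySem.Str.len_eq]
    simp only [pvPrefs, List.mem_cons] at hp
    rcases hp with rfl | hp
    · omega
    · have := ih (t + PySem.Str.len u + 1) p hp
      omega

theorem pvGoA_eq_take (urls : List String) (acc : List String) (t : Int) :
    pvGoA urls acc t =
      acc ++ urls.take ((pvPrefs urls t).countP (fun p => p ≤ 5000)) := by
  induction urls generalizing acc t with
  | nil => simp [pvGoA, pvPrefs]
  | cons u rest ih =>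
    by_cases h : 5000 < t + PySem.Str.len u + 1
    · have hcount : (pvPrefs (u :: rest) t).countP (fun p => p ≤ 5000) = 0 := by
        rw [List.countP_eq_zero]
        intro p hp
        rw [pvPrefs] at hp
        rcases List.mem_cons.mp hp with rfl | hp
        · simp only [decide_eq_true_eq]; omega
        · have := pvPrefs_ge rest (t + PySem.Str.len u + 1) p hp
          simp only [decide_eq_true_eq]; omega
      rw [pvGoA, if_pos h, hcount]
      simp
    · rw [pvGoA, if_neg h, ih, pvPrefs, List.countP_cons]
      have hle : (decide ((t + PySem.Str.len u + 1) ≤ 5000)) = true := by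
        simp only [decide_eq_true_eq]; omega
      rw [hle]
      simp [List.append_assoc, List.take_succ_cons]

-- ===== VERDICT (by name: the statement is the Claim_ definition above) =====
theorem get_url_user_prompt_spec : Claim_equal_get_url_user_prompt := by
  intro urls _
  unfold Spec_get_url_user_prompt get_url_user_prompt get_url_user_prompt_alt
  dsimp only
  rw [pvFoldl_eq_prefs, pvGoA_eq_take]
  simp [PySem.List.slice_to_natCast]
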